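-- pv_equiv track=rewrite | github.com/itswilliboy/Harmony | cogs/infrastructure/error_handler.py | underline
-- ===== SOURCE A (Python) =====
-- def underline(text: str, target: str) -> str:
--     words = text.split()
--     underline = ""
--
--     for word in words:
--         if word == target:
--             position = text.find(word)
--             underline += " " * position + "^" * len(word)
--
--     return f"{text}\n{underline}"
-- ===== SOURCE B (Python) =====
-- def underline(text: str, target: str) -> str:
--     # Every loop iteration of the original appends the identical marker
--     # (find always returns the first occurrence), so the loop collapses
--     # to count-many copies of one marker string.
--     count = text.split().count(target)
--     if count:
--         line = (" " * text.find(target) + "^" * len(target)) * count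
--     else:
--         line = ""
--     return f"{text}\n{line}"
-- ===== Notes on version B (the rewrite author's own statement) =====
-- stated objective: simpler
-- what changed: Replaces the per-word accumulating loop with a closed form: count occurrences of target among the words once and build the line as count copies of a single marker computed from one find.
import Mathlib
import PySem

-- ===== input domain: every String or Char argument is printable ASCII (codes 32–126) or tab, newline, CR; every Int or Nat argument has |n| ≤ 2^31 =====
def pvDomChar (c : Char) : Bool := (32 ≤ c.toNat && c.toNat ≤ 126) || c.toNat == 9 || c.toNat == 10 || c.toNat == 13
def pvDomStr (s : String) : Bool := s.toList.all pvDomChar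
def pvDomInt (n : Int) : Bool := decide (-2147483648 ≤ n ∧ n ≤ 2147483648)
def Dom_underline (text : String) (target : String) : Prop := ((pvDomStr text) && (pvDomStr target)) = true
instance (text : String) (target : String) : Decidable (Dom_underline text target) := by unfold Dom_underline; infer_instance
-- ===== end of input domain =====

-- B replaces A's accumulating loop with count-many copies of one marker: simpler, same result.

-- ===== PORT A =====
-- '" " * position' / '"^" * len(word)' ported as List.replicate with .toNat
-- (Python's str * n is "" for n ≤ 0, matching Int.toNat's clamp; exact).
def underline (text : String) (target : String) : String :=
  let tl := text.toList
  let words := PySem.Chars.split₀ tl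
  let u := words.foldl (fun acc w =>
      if w == target.toList then
        acc ++ List.replicate (PySem.Chars.find tl w).toNat ' '
            ++ List.replicate w.length '^'
      else acc) ([] : List Char)
  String.ofList (tl ++ '\n' :: u)

-- ===== PORT B =====
def underline_alt (text : String) (target : String) : String :=
  let tl := text.toList
  let tgt := target.toList
  let count := (PySem.Chars.split₀ tl).count tgt
  let line :=
    if count ≠ 0 then
      (List.replicate count
        (List.replicate (PySem.Chars.find tl tgt).toNat ' '
          ++ List.replicate tgt.length '^')).flatten
    else []
  String.ofList (tl ++ '\n' :: line)

-- ===== PRECONDITION & SPEC =====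
def Spec_underline (text : String) (target : String) (out : String) : Prop := out = underline_alt text target
instance (text : String) (target : String) (out : String) : Decidable (Spec_underline text target out) := by unfold Spec_underline; infer_instance

-- ===== CLAIM (what is proved, stated in full; the proofs are below) =====
def Claim_equal_underline : Prop := ∀ (text : String) (target : String), Dom_underline text target → Spec_underline text target (underline text target)

-- ===== LEMMAS AND PROOFS =====

-- The loop that appends a fixed block m once per word equal to tgt builds count-many copies of m.
lemma foldl_const_marker (m tgt : List Char) (words : List (List Char)) (acc : List Char) :
    words.foldl (fun a w => if w == tgt then a ++ m else a) acc
      = acc ++ (List.replicate (words.count tgt) m).flatten := by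
  induction words generalizing acc with
  | nil => simp
  | cons w ws ih =>
    rw [List.foldl_cons]
    by_cases h : w == tgt
    · rw [if_pos h, ih]
      simp [List.count_cons, h, List.replicate_succ, List.append_assoc]
    · rw [if_neg h, ih]
      simp [List.count_cons, h]

-- ===== VERDICT (by name: the statement is the Claim_ definition above) =====
theorem underline_spec : Claim_equal_underline := by
  intro text target _
  unfold Spec_underline
  have hfun : (fun (acc : List Char) (w : List Char) =>
      if w == target.toList then
        acc ++ List.replicate (PySem.Chars.find text.toList w).toNat ' '
            ++ List.replicate w.length '^'
      else acc)
    = (fun (acc : List Char) (w : List Char) =>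
      if w == target.toList then
        acc ++ (List.replicate (PySem.Chars.find text.toList target.toList).toNat ' '
            ++ List.replicate target.toList.length '^')
      else acc) := by
    funext acc w
    by_cases h : w == target.toList
    · have : w = target.toList := by simpa using h
      subst this
      simp [List.append_assoc]
    · simp [h]
  simp only [underline, underline_alt]
  rw [hfun, foldl_const_marker]
  by_cases h0 : (PySem.Chars.split₀ text.toList).count target.toList = 0
  · simp [h0]
  · simp [h0]
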